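-- pv_equiv track=rewrite | github.com/RodneeGlenMartin/Group14-Coin-Toss | Archived_Analysis/step_surface.py | derive_from_cumulative
-- ===== SOURCE A (Python) =====
-- def derive_from_cumulative(cum_h_list):
--     results = []
--     prev = 0
--     for ch in cum_h_list:
--         if ch is None:
--             ch = prev
--         results.append(1 if int(ch) > prev else 0)
--         prev = int(ch)
--     return results
-- ===== SOURCE B (Python) =====
-- def derive_from_cumulative(cum_h_list):
--     cleaned = []
--     prev = 0
--     for ch in cum_h_list:
--         prev = prev if ch is None else int(ch)
--         cleaned.append(prev)
--     return [1 if cur > prev else 0 for prev, cur in zip([0] + cleaned, cleaned)]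
-- ===== Notes on version B (the rewrite author's own statement) =====
-- stated objective: alternative
-- what changed: Replaces the single fused loop (result and running state together) with a forward-fill pass building a 'cleaned' list, then a separate pairwise comparison pass over adjacent pairs with an initial zero prefix.
import Mathlib
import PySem

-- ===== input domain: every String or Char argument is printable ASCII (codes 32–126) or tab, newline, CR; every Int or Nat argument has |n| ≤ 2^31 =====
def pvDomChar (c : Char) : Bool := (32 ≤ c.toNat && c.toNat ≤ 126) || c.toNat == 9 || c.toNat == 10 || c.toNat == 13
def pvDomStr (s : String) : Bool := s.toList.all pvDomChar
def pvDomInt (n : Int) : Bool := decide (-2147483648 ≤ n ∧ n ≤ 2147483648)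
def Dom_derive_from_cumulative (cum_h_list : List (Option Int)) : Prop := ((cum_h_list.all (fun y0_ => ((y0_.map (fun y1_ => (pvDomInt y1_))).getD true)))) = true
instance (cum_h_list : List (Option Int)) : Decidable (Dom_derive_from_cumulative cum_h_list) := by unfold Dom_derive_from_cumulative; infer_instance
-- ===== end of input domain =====

-- ===== PORT A =====
-- Literal port of A: one fused loop carrying (results, prev).
def derive_from_cumulative (cum_h_list : List (Option Int)) : List Int :=
  (cum_h_list.foldl (fun (st : List Int × Int) ch =>
      let c : Int := match ch with | none => st.2 | some v => v
      (st.1 ++ [if c > st.2 then (1 : Int) else 0], c)) ([], 0)).1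

-- ===== PORT B =====
-- B: forward-fill pass, then pairwise comparison over adjacent pairs.
def pvFfill (prev : Int) : List (Option Int) → List Int
  | [] => []
  | x :: xs => let c := x.getD prev; c :: pvFfill c xs

def derive_from_cumulative_alt (cum_h_list : List (Option Int)) : List Int :=
  let cleaned := pvFfill 0 cum_h_list
  (List.zip ((0 : Int) :: cleaned) cleaned).map (fun pc => if pc.2 > pc.1 then (1 : Int) else 0)

-- ===== PRECONDITION & SPEC =====
def Spec_derive_from_cumulative (cum_h_list : List (Option Int)) (out : List Int) : Prop := out = derive_from_cumulative_alt cum_h_list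
instance (cum_h_list : List (Option Int)) (out : List Int) : Decidable (Spec_derive_from_cumulative cum_h_list out) := by unfold Spec_derive_from_cumulative; infer_instance

-- ===== CLAIM (what is proved, stated in full; the proofs are below) =====
def Claim_equal_derive_from_cumulative : Prop := ∀ (cum_h_list : List (Option Int)), Dom_derive_from_cumulative cum_h_list → Spec_derive_from_cumulative cum_h_list (derive_from_cumulative cum_h_list)

-- ===== LEMMAS AND PROOFS =====

-- ===== VERDICT (by name: the statement is the Claim_ definition above) =====
lemma pv_fold_eq (l : List (Option Int)) (acc : List Int) (prev : Int) :
    (l.foldl (fun (st : List Int × Int) ch =>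
      let c : Int := match ch with | none => st.2 | some v => v
      (st.1 ++ [if c > st.2 then (1 : Int) else 0], c)) (acc, prev)).1
    = acc ++ (List.zip (prev :: pvFfill prev l) (pvFfill prev l)).map
        (fun pc => if pc.2 > pc.1 then (1 : Int) else 0) := by
  induction l generalizing acc prev with
  | nil => simp [pvFfill]
  | cons x xs ih =>
    cases x <;> simp [pvFfill, List.foldl, ih, Option.getD, List.append_assoc]

theorem derive_from_cumulative_spec : Claim_equal_derive_from_cumulative := by
  intro l _
  unfold Spec_derive_from_cumulative derive_from_cumulative derive_from_cumulative_alt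
  simpa using pv_fold_eq l [] 0
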